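-- pv_equiv track=rewrite | github.com/pc5401/my_BOJ | 백준/Silver/10384. 팬그램/팬그램.py | solve
-- ===== SOURCE A (Python) =====
-- def solve(s):
--     cnt = [0] * 26
--     for ch in s:
--         o = ord(ch)
--         if 65 <= o <= 90:
--             cnt[o - 65] += 1
--         elif 97 <= o <= 122:
--             cnt[o - 97] += 1
--     m = min(cnt)
--     if m >= 3:
--         return "Triple pangram!!!"
--     if m >= 2:
--         return "Double pangram!!"
--     if m >= 1:
--         return "Pangram!"
--     return "Not a pangram"
-- ===== SOURCE B (Python) =====
-- def solve(s):
--     m = min(sum(ord(ch) in (65 + i, 97 + i) for ch in s) for i in range(26))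
--     if m >= 3:
--         return "Triple pangram!!!"
--     if m >= 2:
--         return "Double pangram!!"
--     if m >= 1:
--         return "Pangram!"
--     return "Not a pangram"
-- ===== Notes on version B (the rewrite author's own statement) =====
-- stated objective: idiomatic
-- what changed: Replaces the accumulating 26-slot frequency array with 26 independent scans: m = min over i in range(26) of the number of characters equal to letter i in either case, keeping the identical threshold cascade.
import Mathlib
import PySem

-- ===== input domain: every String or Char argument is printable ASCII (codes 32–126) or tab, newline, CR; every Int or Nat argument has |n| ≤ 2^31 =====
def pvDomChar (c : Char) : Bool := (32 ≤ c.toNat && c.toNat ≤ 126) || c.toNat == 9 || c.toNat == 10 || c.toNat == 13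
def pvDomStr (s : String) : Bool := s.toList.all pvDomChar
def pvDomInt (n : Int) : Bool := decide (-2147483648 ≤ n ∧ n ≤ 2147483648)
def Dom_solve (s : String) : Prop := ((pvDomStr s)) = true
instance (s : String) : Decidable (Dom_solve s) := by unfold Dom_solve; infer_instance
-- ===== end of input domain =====

-- B replaces A's single accumulating pass over a 26-slot frequency array with 26
-- independent per-letter scans (min over i of the count of letter i in either case);
-- objective: more idiomatic, same result.

-- ===== PORT A =====
-- one loop iteration of A: update the 26-slot counter for one character
def solveStep (cnt : List Int) (c : Char) : List Int :=
  -- o = ord(ch) is written c.toNat inline; indices are in range since cnt has length 26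
  if 65 ≤ c.toNat ∧ c.toNat ≤ 90 then
    cnt.set (c.toNat - 65) (cnt.getD (c.toNat - 65) 0 + 1)
  else if 97 ≤ c.toNat ∧ c.toNat ≤ 122 then
    cnt.set (c.toNat - 97) (cnt.getD (c.toNat - 97) 0 + 1)
  else
    cnt

def solve (s : String) : String :=
  let cnt := s.toList.foldl solveStep (List.replicate 26 0)
  -- min(cnt): cnt is nonempty (length 26), so the .getD 0 default is never used
  let m := (PySem.List.min? cnt (fun x => x)).getD 0
  if 3 ≤ m then "Triple pangram!!!"
  else if 2 ≤ m then "Double pangram!!"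
  else if 1 ≤ m then "Pangram!"
  else "Not a pangram"

-- ===== PORT B =====
def solve_alt (s : String) : String :=
  -- min over the generator: nonempty (26 entries), so the .getD 0 default is never used
  let m := (PySem.List.min?
      ((PySem.List.pyRange 0 26 1).map (fun i =>
        (s.toList.map (fun ch =>
          if ((ch.toNat : Int) == 65 + i || (ch.toNat : Int) == 97 + i) then (1 : Int) else 0)).sum))
      (fun x => x)).getD 0
  if 3 ≤ m then "Triple pangram!!!"
  else if 2 ≤ m then "Double pangram!!"
  else if 1 ≤ m then "Pangram!"
  else "Not a pangram"

-- ===== PRECONDITION & SPEC =====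
def Spec_solve (s : String) (out : String) : Prop := out = solve_alt s
instance (s : String) (out : String) : Decidable (Spec_solve s out) := by unfold Spec_solve; infer_instance

-- ===== CLAIM (what is proved, stated in full; the proofs are below) =====
def Claim_equal_solve : Prop := ∀ (s : String), Dom_solve s → Spec_solve s (solve s)

-- ===== LEMMAS AND PROOFS =====

-- the canonical per-letter predicate both sides count
def pvLet (i : Nat) (c : Char) : Bool :=
  ((c.toNat : Int) == 65 + (i : Int) || (c.toNat : Int) == 97 + (i : Int))

lemma getD_map_range (g : Nat → Int) (j : Nat) (h : j < 26) :
    ((List.range 26).map g).getD j 0 = g j := by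
  rw [List.getD_eq_getElem?_getD]
  simp [h]

lemma step_map_range (g : Nat → Int) (c : Char) :
    solveStep ((List.range 26).map g) c
      = (List.range 26).map (fun i => if pvLet i c then g i + 1 else g i) := by
  unfold solveStep
  split_ifs with hU hL
  · rw [getD_map_range g (c.toNat - 65) (by omega)]
    apply List.ext_getElem
    · simp
    · intro k hk hk'
      simp only [List.length_map, List.length_range] at hk'
      rw [List.getElem_set]
      simp only [List.getElem_map, List.getElem_range]
      unfold pvLet
      by_cases hko : c.toNat - 65 = k
      · have : (c.toNat : Int) = 65 + (k : Int) := by omega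
        simp [hko, this]
      · have h1 : ¬ ((c.toNat : Int) = 65 + (k : Int)) := by omega
        have h2 : ¬ ((c.toNat : Int) = 97 + (k : Int)) := by omega
        simp [hko, h1, h2]
  · rw [getD_map_range g (c.toNat - 97) (by omega)]
    apply List.ext_getElem
    · simp
    · intro k hk hk'
      simp only [List.length_map, List.length_range] at hk'
      rw [List.getElem_set]
      simp only [List.getElem_map, List.getElem_range]
      unfold pvLet
      by_cases hko : c.toNat - 97 = k
      · have h1 : ¬ ((c.toNat : Int) = 65 + (k : Int)) := by omega
        have h2 : (c.toNat : Int) = 97 + (k : Int) := by omega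
        simp [hko, h2]
      · have h1 : ¬ ((c.toNat : Int) = 65 + (k : Int)) := by omega
        have h2 : ¬ ((c.toNat : Int) = 97 + (k : Int)) := by omega
        simp [hko, h1, h2]
  · apply List.ext_getElem
    · simp
    · intro k hk hk'
      simp only [List.length_map, List.length_range] at hk'
      simp only [List.getElem_map, List.getElem_range]
      unfold pvLet
      have h1 : ¬ ((c.toNat : Int) = 65 + (k : Int)) := by omega
      have h2 : ¬ ((c.toNat : Int) = 97 + (k : Int)) := by omega
      simp [h1, h2]

lemma foldl_step_map_range (l : List Char) (g : Nat → Int) :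
    l.foldl solveStep ((List.range 26).map g)
      = (List.range 26).map (fun i => g i + (l.countP (pvLet i) : Int)) := by
  induction l generalizing g with
  | nil => simp
  | cons c t ih =>
    rw [List.foldl_cons, step_map_range g c, ih]
    apply List.map_congr_left
    intro i _
    rw [List.countP_cons]
    by_cases h : pvLet i c
    · simp [h]; ring
    · simp [h]

lemma replicate_eq_map_range : (List.replicate 26 (0 : Int)) = (List.range 26).map (fun _ => 0) := by
  decide

lemma pyRange_26 : PySem.List.pyRange 0 26 1 = (List.range 26).map (fun k => Int.ofNat k) := by
  rw [PySem.List.pyRange_one]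
  decide

-- ===== VERDICT (by name: the statement is the Claim_ definition above) =====
theorem solve_spec : Claim_equal_solve := by
  intro s _
  show solve s = solve_alt s
  have key : s.toList.foldl solveStep (List.replicate 26 0)
      = (PySem.List.pyRange 0 26 1).map (fun i =>
          (s.toList.map (fun ch =>
            if ((ch.toNat : Int) == 65 + i || (ch.toNat : Int) == 97 + i) then (1 : Int) else 0)).sum) := by
    rw [replicate_eq_map_range, foldl_step_map_range, pyRange_26, List.map_map]
    apply List.map_congr_left
    intro i _
    simp only [Function.comp_apply]
    rw [PySem.List.sum_map_ite_one_zero]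
    simp only [zero_add]
    rfl
  simp only [solve, solve_alt, key]
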